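-- pv_equiv track=rewrite | github.com/kchan139/p2p-file-sharing | src/strategies/piece_selection.py | select_next_piece
-- ===== SOURCE A (Python) =====
-- from typing import Dict, List, Set, Optional
--
-- def select_next_piece(needed_pieces, peer_pieces, in_progress_pieces, max_pipeline_depth=5) -> List[int]:
--     """
--     Select the rarest piece to download next
--
--     Args:
--         needed_pieces(List[int]): list of needed piece IDs
--         peer_pieces(Dict[str, Set[int]]): dict mapping peer addresses to their pieces
--         in_progress_pieces(Dict[int, float]): dict mapping piece IDs to their download progress (0.0-1.0)
--         max_pipeline_depth(int): max number of simultaneous piece requests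
--
--     Returns:
--         List[int]: list of piece IDs to request
--     """
--     piece_availability = {}
--     for piece_id in needed_pieces:
--         if piece_id not in in_progress_pieces:
--             piece_availability[piece_id] = sum(
--                 1 for pieces in peer_pieces.values() if piece_id in pieces
--             )
--
--     # Sort pieces by rarity, ascending count means more rare
--     rarest_pieces = sorted(
--         piece_availability.items(),
--         key=lambda x: x[1]
--     )
--
--     available_slots = max(0, max_pipeline_depth - len(in_progress_pieces))
--     return [piece_id for piece_id, _ in rarest_pieces[:available_slots]]
-- ===== SOURCE B (Python) =====
-- def select_next_piece(needed_pieces, peer_pieces, in_progress_pieces, max_pipeline_depth=5):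
--     # Scatter a global availability counter in one pass over all peer sets,
--     # dedup the eligible piece ids into a plain list (needed order), then
--     # stable-sort the ids themselves by counter lookup and slice.
--     available_slots = max(0, max_pipeline_depth - len(in_progress_pieces))
--     avail = {}
--     for pieces in peer_pieces.values():
--         for p in pieces:
--             avail[p] = avail.get(p, 0) + 1
--     eligible = []
--     for p in needed_pieces:
--         if p not in in_progress_pieces and p not in eligible:
--             eligible.append(p)
--     eligible.sort(key=lambda p: avail.get(p, 0))
--     return eligible[:available_slots]
-- ===== Notes on version B (the rewrite author's own statement) =====
-- stated objective: faster
-- what changed: B replaces A's per-needed-piece scan of every peer set and its pairs dict by: one scatter pass building a global availability counter over all peer sets, a plain deduplicated list of eligible piece ids (no pairs), and an in-place stable sort of the ids keyed by counter lookup; A's O(n*m) gather loop disappears.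
import Mathlib
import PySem

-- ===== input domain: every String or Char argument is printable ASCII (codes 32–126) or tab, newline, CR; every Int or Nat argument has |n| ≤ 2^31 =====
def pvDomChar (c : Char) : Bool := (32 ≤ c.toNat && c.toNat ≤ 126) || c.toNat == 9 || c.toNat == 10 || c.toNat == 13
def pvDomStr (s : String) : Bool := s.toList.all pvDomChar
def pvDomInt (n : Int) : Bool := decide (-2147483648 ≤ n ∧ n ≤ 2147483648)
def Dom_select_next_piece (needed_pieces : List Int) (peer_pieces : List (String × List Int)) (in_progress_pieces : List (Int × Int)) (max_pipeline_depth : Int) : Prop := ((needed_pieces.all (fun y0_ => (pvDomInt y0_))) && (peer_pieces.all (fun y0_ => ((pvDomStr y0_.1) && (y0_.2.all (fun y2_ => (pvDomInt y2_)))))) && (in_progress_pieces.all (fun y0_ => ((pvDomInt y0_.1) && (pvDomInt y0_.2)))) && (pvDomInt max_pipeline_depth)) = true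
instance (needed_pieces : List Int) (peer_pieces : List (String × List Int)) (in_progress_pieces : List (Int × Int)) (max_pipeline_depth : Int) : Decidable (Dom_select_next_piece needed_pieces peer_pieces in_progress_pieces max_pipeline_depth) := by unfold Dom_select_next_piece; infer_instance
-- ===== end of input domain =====

-- B drops A's pairs dict and its per-needed-piece scan over all peer sets: it scatters a global
-- availability counter in one pass over the peer sets, dedups the eligible piece ids into a plain
-- list, and stable-sorts the ids themselves by counter lookup (faster: A's gather loop disappears).

-- `piece_id in in_progress_pieces` (dict key membership)
def pvInProg (in_progress_pieces : List (Int × Int)) (p : Int) : Bool :=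
  in_progress_pieces.any (fun pr => pr.1 == p)

-- ===== PORT A =====
def select_next_piece (needed_pieces : List Int) (peer_pieces : List (String × List Int)) (in_progress_pieces : List (Int × Int)) (max_pipeline_depth : Int) : List Int :=
  let piece_availability : PySem.Dict Int Int :=
    needed_pieces.foldl (fun d piece_id =>
      if pvInProg in_progress_pieces piece_id then d
      else d.insert piece_id
        (((peer_pieces.map (fun pr => pr.2)).map
            (fun pieces => if pieces.contains piece_id then (1 : Int) else 0)).sum))
      PySem.Dict.empty
  let rarest_pieces := PySem.List.sorted piece_availability.items (fun x => x.2)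
  let available_slots := max 0 (max_pipeline_depth - (in_progress_pieces.length : Int))
  (PySem.List.slice rarest_pieces none (some available_slots)).map (fun pr => pr.1)

-- ===== PORT B =====
def select_next_piece_alt (needed_pieces : List Int) (peer_pieces : List (String × List Int)) (in_progress_pieces : List (Int × Int)) (max_pipeline_depth : Int) : List Int :=
  let available_slots := max 0 (max_pipeline_depth - (in_progress_pieces.length : Int))
  let avail : PySem.Dict Int Int :=
    peer_pieces.foldl (fun d pr =>
      pr.2.foldl (fun d p => d.insert p (d.getD p 0 + 1)) d) PySem.Dict.empty
  let eligible : List Int :=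
    needed_pieces.foldl (fun acc p =>
      if !(pvInProg in_progress_pieces p) && !(acc.contains p) then acc ++ [p] else acc) []
  PySem.List.slice (PySem.List.sorted eligible (fun p => avail.getD p 0)) none (some available_slots)

-- ===== PRECONDITION & SPEC =====
-- The peer piece lists stand for Python SETS (dict[str, set[int]]): by the type convention they
-- hold distinct elements, so Pre_ only rules out representations that no Python input produces.
def Pre_select_next_piece (needed_pieces : List Int) (peer_pieces : List (String × List Int)) (in_progress_pieces : List (Int × Int)) (max_pipeline_depth : Int) : Prop :=
  ∀ pr ∈ peer_pieces, pr.2.Nodup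
instance (needed_pieces : List Int) (peer_pieces : List (String × List Int)) (in_progress_pieces : List (Int × Int)) (max_pipeline_depth : Int) : Decidable (Pre_select_next_piece needed_pieces peer_pieces in_progress_pieces max_pipeline_depth) := by unfold Pre_select_next_piece; infer_instance

def pvWitness_select_next_piece : List Int × (List (String × List Int)) × (List (Int × Int)) × Int :=
  ([1, 2, 3], [("peerA", [2, 3]), ("peerB", [3])], [(1, 0)], 5)

def Spec_select_next_piece (needed_pieces : List Int) (peer_pieces : List (String × List Int)) (in_progress_pieces : List (Int × Int)) (max_pipeline_depth : Int) (out : List Int) : Prop := out = select_next_piece_alt needed_pieces peer_pieces in_progress_pieces max_pipeline_depth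
instance (needed_pieces : List Int) (peer_pieces : List (String × List Int)) (in_progress_pieces : List (Int × Int)) (max_pipeline_depth : Int) (out : List Int) : Decidable (Spec_select_next_piece needed_pieces peer_pieces in_progress_pieces max_pipeline_depth out) := by unfold Spec_select_next_piece; infer_instance

-- ===== CLAIM (what is proved, stated in full; the proofs are below) =====
def Claim_equal_select_next_piece : Prop := ∀ (needed_pieces : List Int) (peer_pieces : List (String × List Int)) (in_progress_pieces : List (Int × Int)) (max_pipeline_depth : Int), Dom_select_next_piece needed_pieces peer_pieces in_progress_pieces max_pipeline_depth → Pre_select_next_piece needed_pieces peer_pieces in_progress_pieces max_pipeline_depth → Spec_select_next_piece needed_pieces peer_pieces in_progress_pieces max_pipeline_depth (select_next_piece needed_pieces peer_pieces in_progress_pieces max_pipeline_depth)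

-- ===== LEMMAS AND PROOFS =====

-- availability of piece p as A computes it (a gather over the peer sets)
def pvAvail (peer_pieces : List (String × List Int)) (p : Int) : Int :=
  ((peer_pieces.map (fun pr => pr.2)).map
      (fun pieces => if pieces.contains p then (1 : Int) else 0)).sum

-- the dict built by inserting (p, pvAvail p) for each p of a list
def pvD (peer_pieces : List (String × List Int)) (xs : List Int) : PySem.Dict Int Int :=
  xs.foldl (fun d p => d.insert p (pvAvail peer_pieces p)) PySem.Dict.empty

-- Nodup: count as a membership indicator
theorem pv_count_indicator (k : Int) (ps : List Int) (h : ps.Nodup) :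
    (ps.count k : Int) = if ps.contains k then (1 : Int) else 0 := by
  by_cases hm : k ∈ ps
  · have h1 : ps.count k = 1 := by
      have hle := List.nodup_iff_count_le_one.mp h k
      have hpos := List.count_pos_iff.mpr hm
      omega
    simp [h1, hm]
  · simp [List.count_eq_zero.mpr hm, hm]

-- B's scatter pass: lookup in the counter is the sum of the per-peer counts
theorem pv_scatter_getD (p : Int) :
    ∀ (L : List (String × List Int)) (d : PySem.Dict Int Int),
      (L.foldl (fun d pr => pr.2.foldl (fun d q => d.insert q (d.getD q 0 + 1)) d) d).getD p 0
        = d.getD p 0 + ((L.map (fun pr => pr.2)).map (fun ps => (ps.count p : Int))).sum := by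
  intro L
  induction L with
  | nil => intro d; simp
  | cons pr L ih =>
    intro d
    simp only [List.foldl_cons, List.map_cons, List.sum_cons]
    rw [ih, PySem.Dict.getD_foldl_insert_add_one]
    ring

-- with Nodup peer sets the counter lookup IS A's availability
theorem pv_avail_eq (peer_pieces : List (String × List Int))
    (hpre : ∀ pr ∈ peer_pieces, pr.2.Nodup) (p : Int) :
    (peer_pieces.foldl (fun d pr => pr.2.foldl (fun d q => d.insert q (d.getD q 0 + 1)) d)
        PySem.Dict.empty).getD p 0 = pvAvail peer_pieces p := by
  rw [pv_scatter_getD, PySem.Dict.getD_empty, zero_add]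
  unfold pvAvail
  rw [List.map_map, List.map_map]
  apply congrArg
  apply List.map_congr_left
  intro pr hpr
  exact pv_count_indicator p pr.2 (hpre pr hpr)

-- lookup in pvD
theorem pv_getD_D (peer_pieces : List (String × List Int)) (k : Int) :
    ∀ (xs : List Int) (d : PySem.Dict Int Int),
      (xs.foldl (fun d p => d.insert p (pvAvail peer_pieces p)) d).get? k
        = if k ∈ xs then some (pvAvail peer_pieces k) else d.get? k := by
  intro xs
  induction xs with
  | nil => intro d; simp
  | cons x xs ih =>
    intro d
    simp only [List.foldl_cons]
    rw [ih, PySem.Dict.get?_insert]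
    by_cases hk : k = x
    · subst hk; simp
    · simp [List.mem_cons, hk]

theorem pv_nodup_keys_D (peer_pieces : List (String × List Int)) (xs : List Int) :
    (pvD peer_pieces xs).keys.Nodup := by
  unfold pvD
  exact PySem.Dict.nodup_keys_foldl_insert xs _ _ (by simp)

-- re-inserting a present key with its stored value changes nothing
theorem pv_insert_noop (d : PySem.Dict Int Int) (p v : Int)
    (hnd : d.keys.Nodup) (hget : d.get? p = some v) : d.insert p v = d := by
  apply PySem.Dict.ext
  have hcon : d.contains p = true := by
    rw [PySem.Dict.contains_eq_isSome_get?, hget]; rfl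
  rw [PySem.Dict.items_insert_of_contains _ _ hcon]
  have : ∀ q ∈ d.items, (if q.1 == p then (p, v) else q) = q := by
    intro q hq
    by_cases h1 : q.1 = p
    · have hq2 : (p, q.2) ∈ d.items := by rw [← h1]; simpa using hq
      have hgv := PySem.Dict.get?_of_mem_items (d := d) hq2 hnd
      rw [hget] at hgv
      simp only [h1, beq_self_eq_true, if_true]
      have hv : q.2 = v := by injection hgv.symm
      rw [← h1, ← hv]
    · simp [h1]
  calc (d.items.map fun q => if q.1 == p then (p, v) else q)
      = d.items.map id := List.map_congr_left this
    _ = d.items := List.map_id d.items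

-- A's guarded dict loop equals the fresh-insert dict of B's deduplicated eligible list
theorem pv_foldA_eq_D (peer_pieces : List (String × List Int)) (ip : List (Int × Int)) :
    ∀ (l acc : List Int), acc.Nodup →
      (l.foldl (fun d piece_id =>
          if pvInProg ip piece_id then d
          else d.insert piece_id (pvAvail peer_pieces piece_id)) (pvD peer_pieces acc))
        = pvD peer_pieces
            (l.foldl (fun a p => if !(pvInProg ip p) && !(a.contains p) then a ++ [p] else a) acc) := by
  intro l
  induction l with
  | nil => intro acc _; rfl
  | cons x l ih =>
    intro acc hnd
    simp only [List.foldl_cons]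
    by_cases hc : pvInProg ip x
    · rw [if_pos hc, if_neg (by simp [hc])]
      exact ih acc hnd
    · by_cases hm : x ∈ acc
      · have hget : (pvD peer_pieces acc).get? x = some (pvAvail peer_pieces x) := by
          unfold pvD; rw [pv_getD_D, if_pos hm]
        rw [if_neg (by simp [hc]), if_neg (by simp [hm]),
            pv_insert_noop _ _ _ (pv_nodup_keys_D peer_pieces acc) hget]
        exact ih acc hnd
      · have hstep : (pvD peer_pieces acc).insert x (pvAvail peer_pieces x)
            = pvD peer_pieces (acc ++ [x]) := by
          unfold pvD; rw [List.foldl_append]; rfl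
        rw [if_neg (by simp [hc]), if_pos (by simp [hc, hm]), hstep]
        exact ih (acc ++ [x]) (by
          rw [List.nodup_append]
          exact ⟨hnd, List.nodup_singleton x, by simpa using fun a ha (he : a = x) => hm (he ▸ ha)⟩)

-- B's eligible list stays Nodup
theorem pv_elig_nodup (ip : List (Int × Int)) :
    ∀ (l acc : List Int), acc.Nodup →
      (l.foldl (fun a p => if !(pvInProg ip p) && !(a.contains p) then a ++ [p] else a) acc).Nodup := by
  intro l
  induction l with
  | nil => intro acc h; exact h
  | cons x l ih =>
    intro acc hnd
    simp only [List.foldl_cons]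
    by_cases hb : (!(pvInProg ip x) && !(acc.contains x)) = true
    · rw [if_pos hb]
      apply ih
      have hm : x ∉ acc := by
        intro hmem
        have hcon : acc.contains x = true := by simpa using hmem
        rw [hcon] at hb
        simp at hb
      rw [List.nodup_append]
      exact ⟨hnd, List.nodup_singleton x, by simpa using fun a ha (he : a = x) => hm (he ▸ ha)⟩
    · rw [if_neg hb]; exact ih acc hnd

-- structural equations of PySem.List.insertBy (not provided by the prelude)
theorem pv_insertBy_nil {α : Type} (bp : α → α → Bool) (x : α) :
    PySem.List.insertBy bp x ([] : List α) = [x] := by simp [PySem.List.insertBy]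

theorem pv_insertBy_cons {α : Type} (bp : α → α → Bool) (x y : α) (ys : List α) :
    PySem.List.insertBy bp x (y :: ys)
      = if bp x y then x :: y :: ys else y :: PySem.List.insertBy bp x ys := by
  simp [PySem.List.insertBy]

-- mapping a function through a stable insertion commutes when the comparison agrees
theorem pv_insertBy_map (g : Int → Int × Int) (bp : Int → Int → Bool)
    (bq : Int × Int → Int × Int → Bool) (h : ∀ a b, bq (g a) (g b) = bp a b) :
    ∀ (l : List Int) (x : Int),
      (PySem.List.insertBy bp x l).map g = PySem.List.insertBy bq (g x) (l.map g) := by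
  intro l
  induction l with
  | nil => intro x; simp [pv_insertBy_nil]
  | cons y ys ih =>
    intro x
    rw [List.map_cons, pv_insertBy_cons, pv_insertBy_cons, h x y]
    by_cases hb : bp x y
    · simp [hb]
    · simp only [eq_false_of_ne_true hb, Bool.false_eq_true, if_false, List.map_cons]
      rw [← ih x]

-- stable sort commutes with mapping when the keys agree
theorem pv_sorted_map (g : Int → Int × Int) (key1 : Int → Int) (key2 : Int × Int → Int)
    (h : ∀ a, key2 (g a) = key1 a) (l : List Int) :
    PySem.List.sorted (l.map g) key2 = (PySem.List.sorted l key1).map g := by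
  rw [PySem.List.sorted_eq_foldl_insertBy, PySem.List.sorted_eq_foldl_insertBy]
  have hcmp : ∀ a b, (fun u v => decide (key2 u < key2 v)) (g a) (g b)
      = (fun u v => decide (key1 u < key1 v)) a b := by
    intro a b; simp [h]
  suffices hgen : ∀ (l acc : List Int),
      (l.map g).foldl (fun a x => PySem.List.insertBy (fun u v => decide (key2 u < key2 v)) x a) (acc.map g)
        = (l.foldl (fun a x => PySem.List.insertBy (fun u v => decide (key1 u < key1 v)) x a) acc).map g by
    simpa using hgen l []
  intro l
  induction l with
  | nil => intro acc; simp
  | cons x xs ih =>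
    intro acc
    simp only [List.map_cons, List.foldl_cons]
    rw [← pv_insertBy_map g _ _ hcmp acc x]
    exact ih _

-- ===== VERDICT (by name: the statement is the Claim_ definition above) =====
theorem select_next_piece_spec : Claim_equal_select_next_piece := by
  intro needed_pieces peer_pieces in_progress_pieces max_pipeline_depth _ hpre
  unfold Spec_select_next_piece
  simp only [select_next_piece, select_next_piece_alt]
  -- name the shared pieces
  set elig := needed_pieces.foldl
      (fun a p => if !(pvInProg in_progress_pieces p) && !(a.contains p) then a ++ [p] else a) []
      with helig
  set slots := max 0 (max_pipeline_depth - (in_progress_pieces.length : Int)) with hslots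
  -- A's dict is the fresh-insert dict of elig
  have hdict :
      (needed_pieces.foldl (fun d piece_id =>
          if pvInProg in_progress_pieces piece_id then d
          else d.insert piece_id (pvAvail peer_pieces piece_id)) PySem.Dict.empty)
        = pvD peer_pieces elig := by
    have h0 := pv_foldA_eq_D peer_pieces in_progress_pieces needed_pieces [] List.nodup_nil
    rw [← helig] at h0
    exact h0
  have hnodup : elig.Nodup := pv_elig_nodup in_progress_pieces needed_pieces [] List.nodup_nil
  -- items of that dict
  have hitems : (pvD peer_pieces elig).items
      = elig.map (fun p => (p, pvAvail peer_pieces p)) := by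
    unfold pvD
    have := PySem.Dict.items_foldl_insert_fresh elig (fun p => p)
      (fun p => pvAvail peer_pieces p) PySem.Dict.empty
      (fun a _ => PySem.Dict.contains_empty a) (by simpa using hnodup)
    simpa using this
  -- B's counter lookup is A's availability
  have hkey : (fun p => (peer_pieces.foldl
        (fun d pr => pr.2.foldl (fun d q => d.insert q (d.getD q 0 + 1)) d)
        PySem.Dict.empty).getD p 0) = fun p => pvAvail peer_pieces p :=
    funext (pv_avail_eq peer_pieces hpre)
  have hsort : PySem.List.sorted (elig.map (fun p => (p, pvAvail peer_pieces p))) (fun x => x.2)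
      = (PySem.List.sorted elig (fun p => pvAvail peer_pieces p)).map
          (fun p => (p, pvAvail peer_pieces p)) :=
    pv_sorted_map _ _ _ (fun _ => rfl) elig
  have hs : (0 : Int) ≤ slots := le_max_left 0 _
  simp only [pvAvail] at hdict hitems hkey hsort
  rw [hdict, hitems, hkey, hsort,
      PySem.List.slice_to _ hs, PySem.List.slice_to _ hs, List.map_take, List.map_map]
  simp [Function.comp_def]
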